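-- pv_equiv track=rewrite | github.com/robertbetts/nuropb_gw | src/nuropb_gw/handlers/base_handler.py | strip_bearer_token
-- ===== SOURCE A (Python) =====
-- _CHECK_PREFIX_CONFIG = ("Bearer :", "Bearer:", "Bearer ", "Bearer")
--
-- def strip_bearer_token(bearer_token: str | None) -> str | None:
--     """Strip the Bearer token prefix from the bearer token string
--
--     :param bearer_token:
--     :return: Bearer token string without the Bearer prefix
--     """
--     if not bearer_token:
--         return bearer_token
--     for prefix in _CHECK_PREFIX_CONFIG:
--         if bearer_token.startswith(prefix):
--             bearer_token = bearer_token[len(prefix):].strip()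
--             break
--     return bearer_token
-- ===== SOURCE B (Python) =====
-- def strip_bearer_token(bearer_token):
--     """Strip the Bearer token prefix from the bearer token string."""
--     if not bearer_token:
--         return bearer_token
--     if not bearer_token.startswith("Bearer"):
--         return bearer_token
--     rest = bearer_token[6:]
--     if rest.startswith(" :"):
--         rest = rest[2:]
--     elif rest.startswith(":") or rest.startswith(" "):
--         rest = rest[1:]
--     return rest.strip()
-- ===== Notes on version B (the rewrite author's own statement) =====
-- stated objective: simpler
-- what changed: Instead of looping over a tuple of four overlapping prefixes, B factors the match: one test for the common six-letter prefix word, then a single branch on the one or two characters that follow it (space-colon, colon, or space), so no prefix table or loop exists.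
import Mathlib
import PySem

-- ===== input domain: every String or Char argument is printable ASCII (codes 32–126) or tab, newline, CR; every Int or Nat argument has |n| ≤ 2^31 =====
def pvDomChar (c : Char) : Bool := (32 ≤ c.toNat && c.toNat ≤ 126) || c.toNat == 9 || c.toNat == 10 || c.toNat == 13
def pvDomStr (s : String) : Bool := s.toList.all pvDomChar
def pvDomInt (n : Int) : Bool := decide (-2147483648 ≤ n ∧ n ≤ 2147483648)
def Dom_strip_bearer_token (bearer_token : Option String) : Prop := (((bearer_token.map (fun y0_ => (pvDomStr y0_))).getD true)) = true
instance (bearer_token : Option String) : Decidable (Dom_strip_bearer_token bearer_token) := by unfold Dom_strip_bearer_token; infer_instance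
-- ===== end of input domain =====

-- B factors A's four-prefix scan into one "Bearer" test plus a branch on the following one/two
-- characters; same return value, no speed claim.
-- ===== PORT A =====
-- literal port of the for-loop over _CHECK_PREFIX_CONFIG with break
def pvStripLoop (s : String) : List String → String
  | [] => s
  | p :: ps =>
    if PySem.Str.startswith s p then
      PySem.Str.strip (PySem.Str.slice s (some (PySem.Str.len p)) none)
    else pvStripLoop s ps

def strip_bearer_token (bearer_token : Option String) : Option String :=
  match bearer_token with
  | none => none
  | some s =>
    if s = "" then some s
    else some (pvStripLoop s ["Bearer :", "Bearer:", "Bearer ", "Bearer"])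

-- ===== PORT B =====
def strip_bearer_token_alt (bearer_token : Option String) : Option String :=
  match bearer_token with
  | none => none
  | some s =>
    if s = "" then some s
    else if PySem.Str.startswith s "Bearer" then
      let rest := PySem.Str.slice s (some 6) none
      let rest2 :=
        if PySem.Str.startswith rest " :" then PySem.Str.slice rest (some 2) none
        else if PySem.Str.startswith rest ":" || PySem.Str.startswith rest " " then
          PySem.Str.slice rest (some 1) none
        else rest
      some (PySem.Str.strip rest2)
    else some s

-- ===== PRECONDITION & SPEC =====
def Spec_strip_bearer_token (bearer_token : Option String) (out : Option String) : Prop := out = strip_bearer_token_alt bearer_token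
instance (bearer_token : Option String) (out : Option String) : Decidable (Spec_strip_bearer_token bearer_token out) := by unfold Spec_strip_bearer_token; infer_instance

-- ===== CLAIM (what is proved, stated in full; the proofs are below) =====
def Claim_equal_strip_bearer_token : Prop := ∀ (bearer_token : Option String), Dom_strip_bearer_token bearer_token → Spec_strip_bearer_token bearer_token (strip_bearer_token bearer_token)

-- ===== LEMMAS AND PROOFS =====

-- ===== VERDICT (by name: the statement is the Claim_ definition above) =====
-- startswith distributes over an appended pattern
lemma pv_sw_append (l p q : List Char) :
    PySem.Chars.startswith l (p ++ q)
      = (PySem.Chars.startswith l p && PySem.Chars.startswith (l.drop p.length) q) := by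
  induction p generalizing l with
  | nil => simp [PySem.Chars.startswith]
  | cons a p ih =>
    cases l with
    | nil => simp [PySem.Chars.startswith, List.isPrefixOf]
    | cons b l =>
      simp only [PySem.Chars.startswith, List.cons_append, List.isPrefixOf, List.length_cons,
        List.drop_succ_cons] at *
      cases h : a == b <;> simp [ih]

-- the core branch equivalence, on the character-list side
lemma pv_main (l : List Char) :
    (if PySem.Chars.startswith l ("Bearer :".toList) then PySem.Chars.strip (l.drop 8)
     else if PySem.Chars.startswith l ("Bearer:".toList) then PySem.Chars.strip (l.drop 7)
     else if PySem.Chars.startswith l ("Bearer ".toList) then PySem.Chars.strip (l.drop 7)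
     else if PySem.Chars.startswith l ("Bearer".toList) then PySem.Chars.strip (l.drop 6)
     else l)
    = (if PySem.Chars.startswith l ("Bearer".toList) then
        PySem.Chars.strip
          (if PySem.Chars.startswith (l.drop 6) (" :".toList) then (l.drop 6).drop 2
           else if PySem.Chars.startswith (l.drop 6) (":".toList)
                  || PySem.Chars.startswith (l.drop 6) (" ".toList) then (l.drop 6).drop 1
           else l.drop 6)
       else l) := by
  have h1 : ("Bearer :".toList) = ("Bearer".toList) ++ (" :".toList) := by decide
  have h2 : ("Bearer:".toList) = ("Bearer".toList) ++ (":".toList) := by decide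
  have h3 : ("Bearer ".toList) = ("Bearer".toList) ++ (" ".toList) := by decide
  have hlen : ("Bearer".toList).length = 6 := by decide
  rw [h1, h2, h3, pv_sw_append, pv_sw_append, pv_sw_append, hlen]
  cases hb : PySem.Chars.startswith l ("Bearer".toList) <;>
    simp only [Bool.false_and, Bool.true_and, if_pos, Bool.false_eq_true, reduceIte]
  cases h01 : PySem.Chars.startswith (l.drop 6) (" :".toList) <;>
  cases h02 : PySem.Chars.startswith (l.drop 6) (":".toList) <;>
  cases h03 : PySem.Chars.startswith (l.drop 6) (" ".toList) <;>
    simp_all [List.drop_drop]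

theorem strip_bearer_token_spec : Claim_equal_strip_bearer_token := by
  unfold Claim_equal_strip_bearer_token
  intro bt _
  unfold Spec_strip_bearer_token strip_bearer_token strip_bearer_token_alt
  cases bt with
  | none => rfl
  | some s =>
    by_cases hs : s = ""
    · simp [hs]
    · have l8 : PySem.Str.len "Bearer :" = 8 := by decide
      have l7 : PySem.Str.len "Bearer:" = 7 := by decide
      have l7' : PySem.Str.len "Bearer " = 7 := by decide
      have l6 : PySem.Str.len "Bearer" = 6 := by decide
      have d8 : ∀ t : String, (PySem.Str.slice t (some 8) none).toList = t.toList.drop 8 := by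
        intro t; rw [PySem.Str.toList_slice]; simp [pysem]
      have d7 : ∀ t : String, (PySem.Str.slice t (some 7) none).toList = t.toList.drop 7 := by
        intro t; rw [PySem.Str.toList_slice]; simp [pysem]
      have d6 : ∀ t : String, (PySem.Str.slice t (some 6) none).toList = t.toList.drop 6 := by
        intro t; rw [PySem.Str.toList_slice]; simp [pysem]
      have d2 : ∀ t : String, (PySem.Str.slice t (some 2) none).toList = t.toList.drop 2 := by
        intro t; rw [PySem.Str.toList_slice]; simp [pysem]
      have d1 : ∀ t : String, (PySem.Str.slice t (some 1) none).toList = t.toList.drop 1 := by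
        intro t; rw [PySem.Str.toList_slice]; simp [pysem]
      have hmain := congrArg String.ofList (pv_main s.toList)
      simp only [apply_ite String.ofList, String.ofList_toList] at hmain
      simp only [hs, reduceIte, pvStripLoop, l8, l7, l7', l6, PySem.Str.startswith_eq,
        PySem.Str.strip, apply_ite String.toList, d8, d7, d6, d2, d1]
      simp only [← apply_ite Option.some]
      exact congrArg some hmain
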